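-- pv_equiv track=rewrite | github.com/MemberJunction/MJ | scripts/pg_convert_seeddata.py | find_seed_section
-- ===== SOURCE A (Python) =====
-- def find_seed_section(lines):
--     """Find the line range for the seed data section (NOCHECK through CHECK)."""
--     # Find first NOCHECK CONSTRAINT line (not inside a procedure)
--     nocheck_start = None
--     for i, line in enumerate(lines):
--         stripped = line.strip()
--         # Looking for ALTER TABLE ... NOCHECK CONSTRAINT at the start of a line (not indented = not in proc)
--         if (stripped.startswith('ALTER TABLE') and 'NOCHECK CONSTRAINT' in stripped
--                 and 'WITH CHECK' not in stripped and not line.startswith('    ')):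
--             nocheck_start = i
--             break
--
--     if nocheck_start is None:
--         # Fallback: find first PRINT('Add rows to' which marks seed data start
--         for i, line in enumerate(lines):
--             if "PRINT(N'Add rows to" in line:
--                 nocheck_start = i
--                 break
--
--     # Find last WITH CHECK CHECK CONSTRAINT line
--     check_end = len(lines) - 1
--     for i in range(len(lines) - 1, -1, -1):
--         stripped = lines[i].strip()
--         if 'WITH CHECK CHECK CONSTRAINT' in stripped:
--             check_end = i
--             break
--
--     return nocheck_start or 0, check_end
-- ===== SOURCE B (Python) =====
-- def find_seed_section(lines):
--     """Find the line range for the seed data section (NOCHECK through CHECK) in one forward pass."""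
--     nocheck_start = None
--     print_fallback = None
--     check_end = None
--     for i, line in enumerate(lines):
--         stripped = line.strip()
--         if (nocheck_start is None and stripped.startswith('ALTER TABLE')
--                 and 'NOCHECK CONSTRAINT' in stripped and 'WITH CHECK' not in stripped
--                 and not line.startswith('    ')):
--             nocheck_start = i
--         if print_fallback is None and "PRINT(N'Add rows to" in line:
--             print_fallback = i
--         if 'WITH CHECK CHECK CONSTRAINT' in stripped:
--             check_end = i
--     start = nocheck_start if nocheck_start is not None else print_fallback
--     if check_end is None:
--         check_end = len(lines) - 1
--     return start or 0, check_end
-- ===== Notes on version B (the rewrite author's own statement) =====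
-- stated objective: simpler
-- what changed: A's three separate scans (two forward searches with early break plus one backward index scan over range(len-1,-1,-1)) are replaced by a single forward pass over enumerate(lines) maintaining three state variables, with the fallback and default resolved after the loop.
import Mathlib
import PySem

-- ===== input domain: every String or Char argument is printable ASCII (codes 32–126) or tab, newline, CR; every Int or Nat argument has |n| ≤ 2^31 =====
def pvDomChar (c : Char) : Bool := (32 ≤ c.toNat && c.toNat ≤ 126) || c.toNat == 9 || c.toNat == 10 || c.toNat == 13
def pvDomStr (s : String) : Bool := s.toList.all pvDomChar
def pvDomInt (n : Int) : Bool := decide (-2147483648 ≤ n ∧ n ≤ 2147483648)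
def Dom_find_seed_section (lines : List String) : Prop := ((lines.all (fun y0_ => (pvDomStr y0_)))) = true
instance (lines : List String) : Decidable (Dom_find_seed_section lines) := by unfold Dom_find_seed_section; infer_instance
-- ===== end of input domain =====

-- B replaces A's three scans (two forward searches with break, one backward search) by a
-- single forward pass maintaining three state variables; same return value (objective: simpler).

-- shared line predicates: both Pythons test these literal identical conditions
def isNocheckLine (line : String) : Bool :=
  let stripped := PySem.Str.strip line
  PySem.Str.startswith stripped "ALTER TABLE" &&
  PySem.Str.isIn "NOCHECK CONSTRAINT" stripped &&
  !(PySem.Str.isIn "WITH CHECK" stripped) &&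
  !(PySem.Str.startswith line "    ")

def isPrintLine (line : String) : Bool :=
  PySem.Str.isIn "PRINT(N'Add rows to" line

def isCheckLine (line : String) : Bool :=
  PySem.Str.isIn "WITH CHECK CHECK CONSTRAINT" (PySem.Str.strip line)

-- ===== PORT A =====
-- first forward loop (enumerate + break)
def aFindNocheck (i : Int) : List String → Option Int
  | [] => none
  | line :: rest => if isNocheckLine line then some i else aFindNocheck (i + 1) rest

-- fallback forward loop (enumerate + break)
def aFindPrint (i : Int) : List String → Option Int
  | [] => none
  | line :: rest => if isPrintLine line then some i else aFindPrint (i + 1) rest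

-- backward loop over range(len-1, -1, -1); check_end starts as len-1, break on first hit
def aFindCheck (lines : List String) : List Int → Int
  | [] => (lines.length : Int) - 1
  | i :: rest =>
      if isCheckLine (PySem.List.pyGetD lines i "") then i else aFindCheck lines rest

def find_seed_section (lines : List String) : Int × Int :=
  let nocheck_start := aFindNocheck 0 lines
  let nocheck_start := match nocheck_start with
    | none => aFindPrint 0 lines
    | some i => some i
  let check_end := aFindCheck lines (PySem.List.pyRange ((lines.length : Int) - 1) (-1) (-1))
  ((match nocheck_start with
    | none => 0
    | some i => if i == 0 then 0 else i),   -- Python `nocheck_start or 0`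
   check_end)

-- ===== PORT B =====
-- single forward pass; state = (i, nocheck_start, print_fallback, check_end)
def bStep (st : Int × Option Int × Option Int × Option Int) (line : String) :
    Int × Option Int × Option Int × Option Int :=
  let (i, ns, pf, ce) := st
  let stripped := PySem.Str.strip line
  (i + 1,
   (if ns.isNone &&
       (PySem.Str.startswith stripped "ALTER TABLE" &&
        PySem.Str.isIn "NOCHECK CONSTRAINT" stripped &&
        !(PySem.Str.isIn "WITH CHECK" stripped) &&
        !(PySem.Str.startswith line "    ")) then some i else ns),
   (if pf.isNone && PySem.Str.isIn "PRINT(N'Add rows to" line then some i else pf),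
   (if PySem.Str.isIn "WITH CHECK CHECK CONSTRAINT" stripped then some i else ce))

def find_seed_section_alt (lines : List String) : Int × Int :=
  let st := lines.foldl bStep (0, none, none, none)
  let start := match st.2.1 with
    | some i => some i
    | none => st.2.2.1
  let check_end := match st.2.2.2 with
    | some i => i
    | none => (lines.length : Int) - 1
  ((match start with
    | none => 0
    | some i => if i == 0 then 0 else i),   -- Python `start or 0`
   check_end)

-- ===== PRECONDITION & SPEC =====
def Spec_find_seed_section (lines : List String) (out : Int × Int) : Prop := out = find_seed_section_alt lines
instance (lines : List String) (out : Int × Int) : Decidable (Spec_find_seed_section lines out) := by unfold Spec_find_seed_section; infer_instance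

-- ===== CLAIM (what is proved, stated in full; the proofs are below) =====
def Claim_equal_find_seed_section : Prop := ∀ (lines : List String), Dom_find_seed_section lines → Spec_find_seed_section lines (find_seed_section lines)

-- ===== LEMMAS AND PROOFS =====

-- the third fold component, written as its own recursion (last matching index, accumulator ce)
def lastC (i : Int) (ce : Option Int) : List String → Option Int
  | [] => ce
  | line :: rest => lastC (i + 1) (if isCheckLine line then some i else ce) rest

theorem bStep_eq (st : Int × Option Int × Option Int × Option Int) (line : String) :
    bStep st line =
      (st.1 + 1,
       (if st.2.1.isNone && isNocheckLine line then some st.1 else st.2.1),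
       (if st.2.2.1.isNone && isPrintLine line then some st.1 else st.2.2.1),
       (if isCheckLine line then some st.1 else st.2.2.2)) := by
  obtain ⟨i, ns, pf, ce⟩ := st
  simp [bStep, isNocheckLine, isPrintLine, isCheckLine]

-- characterisation of B's single pass by A's three searches
theorem foldl_bStep (l : List String) : ∀ (i : Int) (ns pf ce : Option Int),
    l.foldl bStep (i, ns, pf, ce) =
      (i + l.length,
       ns.or (aFindNocheck i l),
       pf.or (aFindPrint i l),
       lastC i ce l) := by
  induction l with
  | nil => intro i ns pf ce; simp [aFindNocheck, aFindPrint, lastC]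
  | cons line rest ih =>
      intro i ns pf ce
      rw [List.foldl_cons, bStep_eq, ih]
      refine Prod.ext (by simp only [List.length_cons]; push_cast; ring) (Prod.ext ?_ (Prod.ext ?_ ?_)) <;>
        simp [aFindNocheck, aFindPrint, lastC] <;>
        cases ns <;> cases pf <;>
        by_cases h1 : isNocheckLine line <;> by_cases h2 : isPrintLine line <;>
        simp [h1, h2]

-- lastC over an appended element
theorem lastC_append (x : String) (l : List String) : ∀ (i : Int) (ce : Option Int),
    lastC i ce (l ++ [x]) =
      if isCheckLine x then some (i + l.length) else lastC i ce l := by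
  induction l with
  | nil => intro i ce; simp [lastC]
  | cons a l ih =>
      intro i ce
      simp only [List.cons_append, lastC, ih, List.length_cons]
      split <;> [skip; rfl]
      congr 1
      push_cast; ring

-- A's backward search as a generalized helper (default d, scanning indices n-1 … 0)
def goFind (lines : List String) (d : Int) : List Int → Int
  | [] => d
  | i :: rest =>
      if isCheckLine (PySem.List.pyGetD lines i "") then i else goFind lines d rest

theorem aFindCheck_eq_goFind (lines : List String) (r : List Int) :
    aFindCheck lines r = goFind lines ((lines.length : Int) - 1) r := by
  induction r with
  | nil => rfl
  | cons i rest ih => simp [aFindCheck, goFind, ih]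

-- last-match helper counting down from n
def lastIdx (lines : List String) : Nat → Option Int
  | 0 => none
  | n + 1 =>
      if isCheckLine (PySem.List.pyGetD lines (n : Int) "") then some (n : Int)
      else lastIdx lines n

theorem goFind_eq_lastIdx (lines : List String) (d : Int) : ∀ (n : Nat),
    goFind lines d (PySem.List.pyRange ((n : Int) - 1) (-1) (-1)) =
      (lastIdx lines n).getD d := by
  intro n
  induction n with
  | zero => rw [PySem.List.pyRange_neg_one_eq_nil (by omega)]; rfl
  | succ n ih =>
      rw [PySem.List.pyRange_neg_one_cons (by omega)]
      simp only [goFind, lastIdx]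
      push_cast
      rw [show (n : Int) + 1 - 1 = (n : Int) by ring]
      simp only [PySem.List.pyGetD_natCast, List.getD]
      split <;> simp [ih]

-- lastIdx is insensitive to appending past the scanned prefix
theorem lastIdx_append (lines : List String) (x : String) : ∀ (n : Nat), n ≤ lines.length →
    lastIdx (lines ++ [x]) n = lastIdx lines n := by
  intro n
  induction n with
  | zero => intro _; rfl
  | succ n ih =>
      intro h
      have hlt : n < lines.length := by omega
      have hg : PySem.List.pyGetD (lines ++ [x]) (n : Int) "" = PySem.List.pyGetD lines (n : Int) "" := by
        simp [PySem.List.pyGetD_natCast, List.getD, List.getElem?_append_left hlt]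
      simp only [lastIdx, ih (by omega), hg]

-- B's accumulated last-match equals the count-down last-match
theorem lastC_eq_lastIdx (lines : List String) :
    lastC 0 none lines = lastIdx lines lines.length := by
  induction lines using List.reverseRecOn with
  | nil => rfl
  | append_singleton l x ih =>
      rw [lastC_append, ih]
      simp only [List.length_append, List.length_singleton, lastIdx]
      rw [lastIdx_append l x l.length (le_refl _)]
      have : PySem.List.pyGetD (l ++ [x]) ((l.length : Int)) "" = x := by
        simp [PySem.List.pyGetD_natCast, List.getD]
      rw [this]
      split <;> simp

theorem check_sides (lines : List String) :
    aFindCheck lines (PySem.List.pyRange ((lines.length : Int) - 1) (-1) (-1)) =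
      (lastC 0 none lines).getD ((lines.length : Int) - 1) := by
  rw [aFindCheck_eq_goFind, goFind_eq_lastIdx, lastC_eq_lastIdx]

-- ===== VERDICT (by name: the statement is the Claim_ definition above) =====
theorem find_seed_section_spec : Claim_equal_find_seed_section := by
  intro lines _
  unfold Spec_find_seed_section find_seed_section find_seed_section_alt
  rw [show ((0 : Int), (none : Option Int), (none : Option Int), (none : Option Int)) =
        ((0 : Int), (none : Option Int), (none : Option Int), (none : Option Int)) from rfl,
      foldl_bStep, check_sides]
  cases h1 : aFindNocheck 0 lines <;> cases h2 : aFindPrint 0 lines <;>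
    cases h3 : lastC 0 none lines <;> simp
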